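-- pv_equiv track=rewrite | github.com/iammohdfazil/DSKE | ComparisonApproach_Huth.py | term_freq_in_papers
-- ===== SOURCE A (Python) =====
-- def term_freq_in_papers(words_set, paper_words_list):
-- 	term_papercount={}				#Dictionary to tore the number of papers in which this term is found
--
-- 	for word in words_set:
-- 		term_freq=0
-- 		for tw_word_list in paper_words_list:
-- 			if word in tw_word_list:
-- 				term_freq=term_freq+1
-- 		term_papercount[word]=term_freq
-- 	return term_papercount
-- ===== SOURCE B (Python) =====
-- def term_freq_in_papers(words_set, paper_words_list):
-- 	# Inverted loops: one pass over the papers with a dict of counts,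
-- 	# deduplicating each paper once, instead of scanning every paper per query word.
-- 	term_papercount = dict.fromkeys(words_set, 0)
-- 	for paper in paper_words_list:
-- 		for w in set(paper):
-- 			if w in term_papercount:
-- 				term_papercount[w] += 1
-- 	return term_papercount
-- ===== Notes on version B (the rewrite author's own statement) =====
-- stated objective: faster
-- what changed: Inverts the loop nesting: initialise a dict of counts keyed by the query words, then make one pass over the papers, deduplicating each paper to a set and incrementing the count of each unique word present in the dict, instead of scanning every paper for every query word.
import Mathlib
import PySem

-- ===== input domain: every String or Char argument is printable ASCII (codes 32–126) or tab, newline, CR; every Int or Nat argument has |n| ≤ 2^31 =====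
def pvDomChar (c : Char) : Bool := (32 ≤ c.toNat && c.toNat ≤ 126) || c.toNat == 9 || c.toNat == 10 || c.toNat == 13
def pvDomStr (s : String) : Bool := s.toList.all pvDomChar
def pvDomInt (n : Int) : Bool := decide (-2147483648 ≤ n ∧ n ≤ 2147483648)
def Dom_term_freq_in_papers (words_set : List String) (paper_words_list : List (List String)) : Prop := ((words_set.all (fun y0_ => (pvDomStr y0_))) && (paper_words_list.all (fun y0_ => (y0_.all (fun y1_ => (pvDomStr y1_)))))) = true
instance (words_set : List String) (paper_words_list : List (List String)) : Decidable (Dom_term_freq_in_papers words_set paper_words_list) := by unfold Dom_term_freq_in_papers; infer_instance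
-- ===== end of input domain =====

-- B inverts the loop nesting (dict of counts over one pass of the deduplicated papers)
-- instead of scanning every paper for every query word; proved to return A's exact dict.


-- ===== PORT A =====
def term_freq_in_papers (words_set : List String) (paper_words_list : List (List String)) : List (String × Int) :=
  (words_set.foldl (fun term_papercount word =>
      term_papercount.insert word
        (paper_words_list.foldl
          (fun term_freq tw_word_list =>
            if tw_word_list.contains word then term_freq + 1 else term_freq)
          (0 : Int)))
    PySem.Dict.empty).items

-- ===== PORT B =====
def term_freq_in_papers_alt (words_set : List String) (paper_words_list : List (List String)) : List (String × Int) :=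
  (paper_words_list.foldl (fun term_papercount paper =>
      (PySem.Set.ofList paper).foldl
        (fun d w => if d.contains w then d.modify w 0 (· + 1) else d)
        term_papercount)
    (words_set.foldl (fun d w => d.insert w (0 : Int)) PySem.Dict.empty)).items

-- ===== PRECONDITION & SPEC =====
def Spec_term_freq_in_papers (words_set : List String) (paper_words_list : List (List String)) (out : List (String × Int)) : Prop := out = term_freq_in_papers_alt words_set paper_words_list
instance (words_set : List String) (paper_words_list : List (List String)) (out : List (String × Int)) : Decidable (Spec_term_freq_in_papers words_set paper_words_list out) := by unfold Spec_term_freq_in_papers; infer_instance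

-- ===== CLAIM (what is proved, stated in full; the proofs are below) =====
def Claim_equal_term_freq_in_papers : Prop := ∀ (words_set : List String) (paper_words_list : List (List String)), Dom_term_freq_in_papers words_set paper_words_list → Spec_term_freq_in_papers words_set paper_words_list (term_freq_in_papers words_set paper_words_list)

-- ===== LEMMAS AND PROOFS =====

-- A loop of inserts whose value depends only on the key: lookup afterwards.
theorem getD_foldl_insert_fn (f : String → Int) (ws : List String)
    (d : PySem.Dict String Int) (k : String) :
    (ws.foldl (fun d w => d.insert w (f w)) d).getD k 0
      = if k ∈ ws then f k else d.getD k 0 := by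
  induction ws generalizing d with
  | nil => simp
  | cons w ws ih =>
    simp only [List.foldl_cons, ih, List.mem_cons]
    by_cases hs : k ∈ ws
    · simp [hs]
    · by_cases hw : k = w
      · subst hw; simp [hs, PySem.Dict.getD_insert_self]
      · simp [hs, hw, PySem.Dict.getD_insert_of_ne _ _ _ hw]

-- B's inner loop (over one deduplicated paper) never changes which keys are present.
theorem contains_inner (s : List String) (d : PySem.Dict String Int) (j : String) :
    (s.foldl (fun d w => if d.contains w then d.modify w 0 (· + 1) else d) d).contains j
      = d.contains j := by
  induction s generalizing d with
  | nil => rfl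
  | cons w s ih =>
    simp only [List.foldl_cons, ih]
    by_cases hc : d.contains w
    · simp only [hc, if_pos, PySem.Dict.modify, PySem.Dict.contains_insert]
      by_cases hj : j = w
      · subst hj; simp [hc]
      · simp [hj]
    · simp [hc]

theorem keys_inner (s : List String) (d : PySem.Dict String Int) :
    (s.foldl (fun d w => if d.contains w then d.modify w 0 (· + 1) else d) d).keys
      = d.keys := by
  induction s generalizing d with
  | nil => rfl
  | cons w s ih =>
    simp only [List.foldl_cons, ih]
    by_cases hc : d.contains w
    · simp only [hc, if_pos, PySem.Dict.modify]
      exact PySem.Dict.keys_insert_of_contains d _ hc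
    · simp [hc]

-- B's inner loop adds 1 to the key's count exactly when the (deduplicated) paper holds it.
theorem getD_inner (s : List String) (hs : s.Nodup) (d : PySem.Dict String Int) (k : String) :
    (s.foldl (fun d w => if d.contains w then d.modify w 0 (· + 1) else d) d).getD k 0
      = d.getD k 0 + (if k ∈ s ∧ d.contains k = true then 1 else 0) := by
  induction s generalizing d with
  | nil => simp
  | cons w s ih =>
    obtain ⟨hw, hs'⟩ := List.nodup_cons.mp hs
    simp only [List.foldl_cons]
    rw [ih hs']
    by_cases hc : d.contains w
    · simp only [hc, if_pos, PySem.Dict.modify, PySem.Dict.contains_insert, List.mem_cons]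
      by_cases hk : k = w
      · subst hk
        have : k ∉ s := hw
        simp [this, hc, PySem.Dict.getD_insert_self]
      · rw [PySem.Dict.getD_insert_of_ne _ _ _ hk]
        simp [hk]
    · simp only [hc, Bool.false_eq_true, List.mem_cons]
      by_cases hk : k = w
      · subst hk; simp [hw, hc]
      · simp [hk]

-- B's outer loop: each present key ends at the number of papers that contain it.
theorem getD_outer (pl : List (List String)) (d : PySem.Dict String Int) (k : String) :
    (pl.foldl (fun d p =>
        (PySem.Set.ofList p).foldl
          (fun d w => if d.contains w then d.modify w 0 (· + 1) else d) d) d).getD k 0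
      = d.getD k 0
        + (if d.contains k then ((pl.countP (fun p => p.contains k) : Nat) : Int) else 0) := by
  induction pl generalizing d with
  | nil => simp
  | cons p pl ih =>
    simp only [List.foldl_cons]
    rw [ih, contains_inner, getD_inner _ (PySem.Set.nodup_ofList p)]
    have hmem : k ∈ PySem.Set.ofList p ↔ p.contains k := by
      rw [PySem.Set.mem_ofList]
      exact List.contains_iff_mem.symm
    rw [List.countP_cons]
    by_cases hc : d.contains k
    · by_cases hp : p.contains k
      · have : k ∈ PySem.Set.ofList p := hmem.mpr hp
        simp only [hc, hp, this, and_self, if_pos]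
        push_cast
        ring
      · have h1 : k ∉ PySem.Set.ofList p := fun h => hp (hmem.mp h)
        have h2 : k ∉ p := fun h => hp (List.contains_iff_mem.mpr h)
        simp [hc, h1, h2]
    · simp [hc]

theorem keys_outer (pl : List (List String)) (d : PySem.Dict String Int) :
    (pl.foldl (fun d p =>
        (PySem.Set.ofList p).foldl
          (fun d w => if d.contains w then d.modify w 0 (· + 1) else d) d) d).keys
      = d.keys := by
  induction pl generalizing d with
  | nil => rfl
  | cons p pl ih => simp only [List.foldl_cons, ih, keys_inner]

theorem keys_insert_fn (f : String → Int) (ws : List String) :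
    (ws.foldl (fun d w => d.insert w (f w)) (PySem.Dict.empty : PySem.Dict String Int)).keys
      = PySem.Set.ofList ws := by
  have := PySem.Dict.keys_foldl_insert ws (fun _ w => f w)
      (PySem.Dict.empty : PySem.Dict String Int)
  simpa [PySem.Set.update, PySem.Set.ofList, PySem.Dict.keys_empty] using this

-- ===== VERDICT (by name: the statement is the Claim_ definition above) =====
theorem term_freq_in_papers_spec : Claim_equal_term_freq_in_papers := by
  intro ws pl _
  show term_freq_in_papers ws pl = term_freq_in_papers_alt ws pl
  unfold term_freq_in_papers term_freq_in_papers_alt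
  set dA := ws.foldl (fun d w => d.insert w
      (pl.foldl (fun t p => if p.contains w then t + 1 else t) (0 : Int)))
      (PySem.Dict.empty : PySem.Dict String Int) with hdA
  set d0 := ws.foldl (fun d w => d.insert w (0 : Int))
      (PySem.Dict.empty : PySem.Dict String Int) with hd0
  set dB := pl.foldl (fun d p =>
      (PySem.Set.ofList p).foldl
        (fun d w => if d.contains w then d.modify w 0 (· + 1) else d) d) d0 with hdB
  have hkA : dA.keys = PySem.Set.ofList ws := keys_insert_fn _ ws
  have hk0 : d0.keys = PySem.Set.ofList ws := keys_insert_fn (fun _ => 0) ws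
  have hkB : dB.keys = PySem.Set.ofList ws := by rw [hdB, keys_outer, hk0]
  have hnd : (PySem.Set.ofList ws).Nodup := PySem.Set.nodup_ofList ws
  rw [PySem.Dict.items_eq_map_keys dA (hkA ▸ hnd) 0,
      PySem.Dict.items_eq_map_keys dB (hkB ▸ hnd) 0, hkA, hkB]
  apply List.map_congr_left
  intro k hk
  have hkws : k ∈ ws := (PySem.Set.mem_ofList ws k).mp hk
  have hcont0 : d0.contains k = true :=
    (PySem.Dict.contains_iff_mem_keys d0 k).mpr (hk0 ▸ hk)
  have hA : dA.getD k 0 = pl.foldl (fun t p => if p.contains k then t + 1 else t) (0 : Int) := by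
    rw [hdA, getD_foldl_insert_fn]; simp [hkws]
  have h0 : d0.getD k 0 = 0 := by
    rw [hd0, getD_foldl_insert_fn (fun _ => 0)]; simp
  have hB : dB.getD k 0 = ((pl.countP (fun p => p.contains k) : Nat) : Int) := by
    rw [hdB, getD_outer, h0, if_pos hcont0, zero_add]
  rw [hA, hB, PySem.List.foldl_count_if, zero_add]
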